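-- pv_equiv track=rewrite | github.com/yeojeong735/coding_test | 프로그래머스/0/181932. 코드 처리하기/코드 처리하기.py | solution
-- ===== SOURCE A (Python) =====
-- def solution(code):
--
--     mode = 0
--     ret = ''
--
--     for idx, x in enumerate(code):
--         if mode == 0:
--             if x != "1" and idx%2 == 0:
--                 ret += x
--             elif x == '1':
--                 mode = 1
--         elif mode == 1:
--             if x != "1" and idx%2 == 1:
--                 ret += x
--             elif x == "1":
--                 mode = 0
--
--
--     if ret == '':
--         return "EMPTY"
--     else :
--         return ret
-- ===== SOURCE B (Python) =====
-- def solution(code):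
--     # Precompute prefix counts of '1's: ones_before[i] = number of '1' chars strictly before index i.
--     ones_before = [0] * len(code)
--     acc = 0
--     for i, c in enumerate(code):
--         ones_before[i] = acc
--         if c == '1':
--             acc += 1
--     ret = ''.join(c for idx, c in enumerate(code)
--                   if c != '1' and (idx + ones_before[idx]) % 2 == 0)
--     return ret if ret else 'EMPTY'
-- ===== Notes on version B (the rewrite author's own statement) =====
-- stated objective: alternative
-- what changed: Replaces A's inline mode-toggle state machine with a precomputed prefix-count table of '1's followed by a separate single filtering pass keyed on (idx + ones_before[idx]) parity.
import Mathlib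
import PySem

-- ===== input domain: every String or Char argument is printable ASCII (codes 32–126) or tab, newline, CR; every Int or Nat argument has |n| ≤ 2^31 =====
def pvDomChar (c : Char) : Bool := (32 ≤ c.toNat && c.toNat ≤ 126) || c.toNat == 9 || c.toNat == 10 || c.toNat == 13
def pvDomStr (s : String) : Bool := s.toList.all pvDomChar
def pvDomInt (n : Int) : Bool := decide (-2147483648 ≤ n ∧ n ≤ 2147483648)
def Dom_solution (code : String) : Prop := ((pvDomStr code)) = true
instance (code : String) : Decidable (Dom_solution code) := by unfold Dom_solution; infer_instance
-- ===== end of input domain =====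

-- B replaces A's inline mode-toggle state machine by a precomputed prefix-count table of '1's
-- plus a single filtering pass (objective: alternative decomposition, same cost).

-- ===== PORT A =====
-- state = (mode, ret); one step of A's for-loop body
def solStep (s : Int × List Char) (p : Int × Char) : Int × List Char :=
  if s.1 = 0 then
    if p.2 ≠ '1' ∧ p.1 % 2 = 0 then (s.1, s.2 ++ [p.2])
    else if p.2 = '1' then (1, s.2)
    else s
  else if s.1 = 1 then
    if p.2 ≠ '1' ∧ p.1 % 2 = 1 then (s.1, s.2 ++ [p.2])
    else if p.2 = '1' then (0, s.2)
    else s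
  else s

def solution (code : String) : String :=
  let r := (PySem.List.enumerate code.toList).foldl solStep (0, [])
  if r.2 = [] then "EMPTY" else String.ofList r.2

-- ===== PORT B =====
-- one step of B's table-building loop: state = (running count, ones_before so far)
def onesStep (st : Nat × List Nat) (c : Char) : Nat × List Nat :=
  (st.1 + (if c = '1' then 1 else 0), st.2 ++ [st.1])

def solution_alt (code : String) : String :=
  let cs := code.toList
  let ones := (cs.foldl onesStep (0, [])).2
  let ret := ((PySem.List.enumerate cs).filter
      (fun p => decide (p.2 ≠ '1' ∧ (p.1 + ((ones.getD p.1.toNat 0 : Nat) : Int)) % 2 = 0))).map (·.2)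
  if ret = [] then "EMPTY" else String.ofList ret

-- ===== PRECONDITION & SPEC =====
def Spec_solution (code : String) (out : String) : Prop := out = solution_alt code
instance (code : String) (out : String) : Decidable (Spec_solution code out) := by unfold Spec_solution; infer_instance

-- ===== CLAIM (what is proved, stated in full; the proofs are below) =====
def Claim_equal_solution : Prop := ∀ (code : String), Dom_solution code → Spec_solution code (solution code)

-- ===== LEMMAS AND PROOFS =====

-- common reference: chars kept when scanning cs from absolute index i with mode m
def goKeep : List Char → Nat → Nat → List Char
  | [], _, _ => []
  | c :: cs, i, m =>
    if c = '1' then goKeep cs (i+1) (1 - m)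
    else if i % 2 = m then c :: goKeep cs (i+1) m
    else goKeep cs (i+1) m

def cntOnes : List Char → Nat
  | [] => 0
  | c :: cs => (if c = '1' then 1 else 0) + cntOnes cs

-- A's fold computes goKeep
theorem A_fold (cs : List Char) : ∀ (i m : Nat) (ret : List Char), m = 0 ∨ m = 1 →
    ((PySem.List.enumerate cs (i : Int)).foldl solStep ((m : Int), ret)).2 = ret ++ goKeep cs i m := by
  induction cs with
  | nil => intro i m ret _; simp [PySem.List.enumerate_nil, goKeep]
  | cons c cs ih =>
    intro i m ret hm
    rw [PySem.List.enumerate_cons, List.foldl_cons]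
    have hcast : ((i : Int) + 1) = ((i + 1 : Nat) : Int) := by push_cast; ring
    rcases hm with hm | hm <;> subst hm <;>
      simp only [Nat.cast_zero, Nat.cast_one] <;> by_cases hc : c = '1'
    · have hs : solStep ((0:Int), ret) ((i:Int), c) = (1, ret) := by simp [solStep, hc]
      rw [hs, hcast]
      simpa [goKeep, hc] using ih (i+1) 1 ret (Or.inr rfl)
    · by_cases hp : i % 2 = 0
      · have hI : (i:Int) % 2 = 0 := by omega
        have hs : solStep ((0:Int), ret) ((i:Int), c) = (0, ret ++ [c]) := by
          simp [solStep, hc, hI]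
        rw [hs, hcast]
        simpa [goKeep, hc, hp, List.append_assoc] using ih (i+1) 0 (ret ++ [c]) (Or.inl rfl)
      · have hI : ¬ ((i:Int) % 2 = 0) := by omega
        have hs : solStep ((0:Int), ret) ((i:Int), c) = (0, ret) := by
          simp [solStep, hc, hI]
        rw [hs, hcast]
        simpa [goKeep, hc, hp] using ih (i+1) 0 ret (Or.inl rfl)
    · have hs : solStep ((1:Int), ret) ((i:Int), c) = (0, ret) := by simp [solStep, hc]
      rw [hs, hcast]
      simpa [goKeep, hc] using ih (i+1) 0 ret (Or.inl rfl)
    · by_cases hp : i % 2 = 1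
      · have hI : (i:Int) % 2 = 1 := by omega
        have hs : solStep ((1:Int), ret) ((i:Int), c) = (1, ret ++ [c]) := by
          simp [solStep, hc, hI]
        rw [hs, hcast]
        simpa [goKeep, hc, hp, List.append_assoc] using ih (i+1) 1 (ret ++ [c]) (Or.inr rfl)
      · have hI : ¬ ((i:Int) % 2 = 1) := by omega
        have hs : solStep ((1:Int), ret) ((i:Int), c) = (1, ret) := by
          simp [solStep, hc, hI]
        rw [hs, hcast]
        simpa [goKeep, hc, hp] using ih (i+1) 1 ret (Or.inr rfl)

-- reference form of B's table
def tabOnes : List Char → Nat → List Nat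
  | [], _ => []
  | c :: cs, a => a :: tabOnes cs (a + (if c = '1' then 1 else 0))

theorem ones_fold (cs : List Char) : ∀ (a : Nat) (acc : List Nat),
    (cs.foldl onesStep (a, acc)).2 = acc ++ tabOnes cs a := by
  induction cs with
  | nil => intro a acc; simp [tabOnes]
  | cons c cs ih => intro a acc; simp [onesStep, tabOnes, ih]

theorem tab_getD (cs : List Char) : ∀ (a j : Nat), j < cs.length →
    (tabOnes cs a).getD j 0 = a + cntOnes (cs.take j) := by
  induction cs with
  | nil => intro a j h; simp at h
  | cons c cs ih =>
    intro a j h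
    cases j with
    | zero => simp [tabOnes, cntOnes]
    | succ j =>
      simp only [tabOnes, List.getD_cons_succ, List.take_succ_cons, cntOnes]
      rw [ih _ j (by simpa using h)]
      omega

-- B's filter computes goKeep, given any table agreeing with prefix counts
theorem B_filt (cs : List Char) : ∀ (i a : Nat) (T : List Nat),
    (∀ j, j < cs.length → T.getD (i + j) 0 = a + cntOnes (cs.take j)) →
    (((PySem.List.enumerate cs (i : Int)).filter
      (fun p => decide (p.2 ≠ '1' ∧ (p.1 + ((T.getD p.1.toNat 0 : Nat) : Int)) % 2 = 0))).map (·.2))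
      = goKeep cs i (a % 2) := by
  induction cs with
  | nil => intro i a T _; simp [PySem.List.enumerate_nil, goKeep]
  | cons c cs ih =>
    intro i a T hT
    rw [PySem.List.enumerate_cons, List.filter_cons]
    simp only [decide_eq_true_eq]
    have h0 : T.getD i 0 = a := by simpa [cntOnes] using hT 0 (by simp)
    have hcast : ((i : Int)).toNat = i := by omega
    have hcond : ((i:Int) + ((T.getD ((i:Int)).toNat 0 : Nat) : Int)) % 2 = 0 ↔ i % 2 = a % 2 := by
      rw [hcast, h0]; omega
    have hcast1 : ((i : Int) + 1) = ((i + 1 : Nat) : Int) := by push_cast; ring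
    by_cases hc : c = '1'
    · subst hc
      rw [if_neg (fun h => h.1 rfl)]
      have hrec := ih (i+1) (a+1) T (fun j hj => by
        have h := hT (j+1) (by simpa using hj)
        have he : i + 1 + j = i + (j + 1) := by omega
        rw [he]
        simp only [List.take_succ_cons, cntOnes, if_true] at h
        omega)
      rw [hcast1, hrec]
      have hm : (a+1) % 2 = 1 - a % 2 := by omega
      simp [goKeep, hm]
    · have hrec := ih (i+1) a T (fun j hj => by
        have h := hT (j+1) (by simpa using hj)
        have he : i + 1 + j = i + (j + 1) := by omega
        rw [he]
        simp only [List.take_succ_cons, cntOnes, if_neg hc] at h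
        omega)
      by_cases hp : i % 2 = a % 2
      · rw [if_pos ⟨hc, hcond.mpr hp⟩]
        simp only [List.map_cons]
        rw [hcast1, hrec]
        simp [goKeep, hc, hp]
      · rw [if_neg (fun h => hp (hcond.mp h.2))]
        rw [hcast1, hrec]
        simp [goKeep, hc, hp]

-- ===== VERDICT (by name: the statement is the Claim_ definition above) =====
theorem solution_spec : Claim_equal_solution := by
  intro code _
  unfold Spec_solution
  have hT : ∀ j, j < code.toList.length →
      (tabOnes code.toList 0).getD (0 + j) 0 = 0 + cntOnes (List.take j code.toList) :=
    fun j hj => by simpa using tab_getD code.toList 0 j hj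
  have hA := A_fold code.toList 0 0 [] (Or.inl rfl)
  have hB := B_filt code.toList 0 0 (tabOnes code.toList 0) hT
  simp only [Nat.cast_zero, List.nil_append, Nat.zero_mod] at hA hB
  simp only [solution, solution_alt, ones_fold, List.nil_append, hA, hB]
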